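-- pv_equiv track=rewrite | github.com/probreather/2022_TGwinG_NP_Taeju | Python/4week_assignment.py | stock_price
-- ===== SOURCE A (Python) =====
-- def stock_price(stockChart):
--     answer = str()
--     log = list()
--     total = 0
--     a = len(stockChart)
--     for i in range(0, a):
--         log.append(total + stockChart[i])
--         total += stockChart[i]
--
--     b = log[0]
--
--     for i in range(0, a):
--         if b >= log[i]:
--             b = log[i]
--             c = i
--
--     if c == a-1 :
--         answer = "아니야 조금만 더 기다려"
--     else :
--         answer = str((a-c-1))+"일 전에 샀어야지 으이구"
--     return answer
-- ===== SOURCE B (Python) =====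
-- def stock_price(stockChart):
--     # single pass: running prefix sum and last index of its minimum
--     total = stockChart[0]
--     best = total
--     c = 0
--     for i in range(1, len(stockChart)):
--         total += stockChart[i]
--         if total <= best:
--             best = total
--             c = i
--     if c == len(stockChart) - 1:
--         return "아니야 조금만 더 기다려"
--     return str(len(stockChart) - c - 1) + "일 전에 샀어야지 으이구"
-- ===== Notes on version B (the rewrite author's own statement) =====
-- stated objective: simpler
-- what changed: B fuses A's two passes (build the prefix-sum list, then scan it for the last minimum) into one loop that maintains the running prefix sum and the running minimum with its last index, with no intermediate list.
import Mathlib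
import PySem

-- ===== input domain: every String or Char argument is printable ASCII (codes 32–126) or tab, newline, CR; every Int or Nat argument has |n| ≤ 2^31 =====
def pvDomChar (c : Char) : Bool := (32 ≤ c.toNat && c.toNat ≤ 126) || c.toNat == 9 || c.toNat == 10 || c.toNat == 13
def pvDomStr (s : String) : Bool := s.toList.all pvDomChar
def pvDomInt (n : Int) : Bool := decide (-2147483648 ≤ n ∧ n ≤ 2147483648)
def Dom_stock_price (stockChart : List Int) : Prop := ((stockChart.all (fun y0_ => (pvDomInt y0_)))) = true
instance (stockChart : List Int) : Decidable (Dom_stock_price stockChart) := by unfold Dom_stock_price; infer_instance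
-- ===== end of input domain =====

-- B fuses A's two passes (build the prefix-sum list, then scan it) into one loop holding only the running sum and minimum (simpler, no intermediate list).

-- ===== PORT A =====
-- pass 1 builds the prefix-sum list `log`; pass 2 scans it for the last index of its minimum
def stock_price (stockChart : List Int) : String :=
  let a : Int := stockChart.length
  let st1 := (PySem.List.pyRange 0 a 1).foldl
      (fun (st : List Int × Int) i =>
        (fun v => (st.1 ++ [st.2 + v], st.2 + v)) (PySem.List.pyGetD stockChart i 0))
      ([], 0)
  let log := st1.1
  match PySem.List.pyGet? log 0 with
  | none => ""   -- Python raises IndexError here (log[0] on empty input); excluded by Pre_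
  | some b0 =>
    let st2 := (PySem.List.pyRange 0 a 1).foldl
        (fun (st : Int × Int) i =>
          let v := PySem.List.pyGetD log i 0
          if st.1 ≥ v then (v, i) else st)
        (b0, 0)
    if st2.2 == a - 1 then "아니야 조금만 더 기다려"
    else PySem.Int.toStr (a - st2.2 - 1) ++ "일 전에 샀어야지 으이구"

-- ===== PORT B =====
-- one pass: running prefix sum `t`, running minimum with its last index
def stock_price_alt (stockChart : List Int) : String :=
  match stockChart with
  | [] => ""   -- Python raises IndexError here (stockChart[0]); excluded by Pre_
  | x :: _ =>
    let n : Int := stockChart.length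
    let st := (PySem.List.pyRange 1 n 1).foldl
        (fun (st : Int × Int × Int) i =>
          let t := st.1 + PySem.List.pyGetD stockChart i 0
          if t ≤ st.2.1 then (t, t, i) else (t, st.2.1, st.2.2))
        (x, x, 0)
    if st.2.2 == n - 1 then "아니야 조금만 더 기다려"
    else PySem.Int.toStr (n - st.2.2 - 1) ++ "일 전에 샀어야지 으이구"

-- ===== PRECONDITION & SPEC =====
-- A raises IndexError (log[0]) on the empty list; Pre_ excludes exactly that input.
def Pre_stock_price (stockChart : List Int) : Prop := stockChart ≠ []
instance (stockChart : List Int) : Decidable (Pre_stock_price stockChart) := by unfold Pre_stock_price; infer_instance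
def pvWitness_stock_price : List Int := ([3, -1, -2, 4])

def Spec_stock_price (stockChart : List Int) (out : String) : Prop := out = stock_price_alt stockChart
instance (stockChart : List Int) (out : String) : Decidable (Spec_stock_price stockChart out) := by unfold Spec_stock_price; infer_instance

-- ===== CLAIM (what is proved, stated in full; the proofs are below) =====
def Claim_equal_stock_price : Prop := ∀ (stockChart : List Int), Dom_stock_price stockChart → Pre_stock_price stockChart → Spec_stock_price stockChart (stock_price stockChart)

-- ===== LEMMAS AND PROOFS =====

-- the prefix-sum list built by A's first loop when the running total starts at t
def prefA : List Int → Int → List Int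
  | [], _ => []
  | v :: xs, t => (t + v) :: prefA xs (t + v)

theorem length_prefA (xs : List Int) (t : Int) : (prefA xs t).length = xs.length := by
  induction xs generalizing t with
  | nil => rfl
  | cons v xs ih => simp [prefA, ih]

theorem getElem_prefA (xs : List Int) (t : Int) (k : Nat) (hk : k < xs.length) :
    (prefA xs t)[k]'(by rw [length_prefA]; exact hk) = t + (xs.take (k + 1)).sum := by
  induction xs generalizing t k with
  | nil => simp at hk
  | cons v xs ih =>
    cases k with
    | zero => simp [prefA]
    | succ k =>
      simp only [prefA, List.getElem_cons_succ, List.take_succ_cons, List.sum_cons]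
      rw [ih (t + v) k (by simpa using hk)]
      ring

-- A's first loop produces exactly the prefix-sum list
theorem foldA_eq (xs : List Int) (acc : List Int) (t : Int) :
    xs.foldl (fun (st : List Int × Int) v => (st.1 ++ [st.2 + v], st.2 + v)) (acc, t)
      = (acc ++ prefA xs t, t + xs.sum) := by
  induction xs generalizing acc t with
  | nil => simp [prefA]
  | cons v xs ih => simp [prefA, ih, add_assoc]

-- the loop invariant: from index j on, A's scan of the prefix list and B's fused loop
-- (whose running total equals the prefix sum up to j) keep the same (minimum, index) pair
theorem loop_eq (xs : List Int) (m : Nat) :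
    ∀ (j b c : Int), 0 ≤ j → j + m = (xs.length : Int) →
    (PySem.List.pyRange j (xs.length : Int) 1).foldl
        (fun (st : Int × Int) i =>
          let v := PySem.List.pyGetD (prefA xs 0) i 0
          if st.1 ≥ v then (v, i) else st) (b, c)
      = ((((PySem.List.pyRange j (xs.length : Int) 1).foldl
          (fun (st : Int × Int × Int) i =>
            let t := st.1 + PySem.List.pyGetD xs i 0
            if t ≤ st.2.1 then (t, t, i) else (t, st.2.1, st.2.2))
          ((xs.take j.toNat).sum, b, c))).2.1,
         (((PySem.List.pyRange j (xs.length : Int) 1).foldl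
          (fun (st : Int × Int × Int) i =>
            let t := st.1 + PySem.List.pyGetD xs i 0
            if t ≤ st.2.1 then (t, t, i) else (t, st.2.1, st.2.2))
          ((xs.take j.toNat).sum, b, c))).2.2) := by
  induction m with
  | zero =>
    intro j b c h0 hj
    rw [PySem.List.pyRange_one_eq_nil (by omega)]
    simp
  | succ m ih =>
    intro j b c h0 hj
    have hjlt : j < (xs.length : Int) := by omega
    have hjn : j.toNat < xs.length := by omega
    rw [PySem.List.pyRange_one_cons hjlt]
    simp only [List.foldl_cons]
    have hx : PySem.List.pyGetD xs j 0 = xs[j.toNat]'hjn :=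
      PySem.List.pyGetD_eq_getElem xs 0 h0 hjlt
    have hlog : PySem.List.pyGetD (prefA xs 0) j 0 = (xs.take (j.toNat + 1)).sum := by
      have h1 : j < ((prefA xs 0).length : Int) := by rw [length_prefA]; omega
      rw [PySem.List.pyGetD_eq_getElem _ 0 h0 h1, getElem_prefA xs 0 j.toNat (by omega)]
      ring
    have hsum : (xs.take j.toNat).sum + PySem.List.pyGetD xs j 0 = (xs.take (j.toNat + 1)).sum := by
      rw [hx, List.sum_take_succ xs j.toNat hjn]
    have htn : (j + 1).toNat = j.toNat + 1 := by omega
    simp only [hlog, hsum, ge_iff_le]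
    by_cases hcmp : (xs.take (j.toNat + 1)).sum ≤ b
    · rw [if_pos hcmp, if_pos hcmp]
      have := ih (j + 1) ((xs.take (j.toNat + 1)).sum) j (by omega) (by omega)
      rw [htn] at this
      exact this
    · rw [if_neg hcmp, if_neg hcmp]
      have := ih (j + 1) b c (by omega) (by omega)
      rw [htn] at this
      exact this

theorem main_eq (xs : List Int) (h : xs ≠ []) : stock_price xs = stock_price_alt xs := by
  cases xs with
  | nil => exact absurd rfl h
  | cons x rest =>
    simp only [stock_price, stock_price_alt]
    rw [PySem.List.foldl_pyRange_zero_pyGetD' (x :: rest) 0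
        (fun (st : List Int × Int) v => (st.1 ++ [st.2 + v], st.2 + v)) ([], 0)]
    rw [foldA_eq]
    simp only [List.nil_append, prefA, zero_add]
    have hget : PySem.List.pyGet? (x :: prefA rest x) 0 = some x := by
      simp [PySem.List.pyGet?, PySem.List.pyIdx?]
    rw [hget]
    have hlen : (0:Int) < ((x :: rest).length : Int) := by
      simp
    rw [PySem.List.pyRange_one_cons hlen]
    simp only [List.foldl_cons]
    have hv0 : PySem.List.pyGetD (x :: prefA rest x) 0 0 = x := by
      simp [PySem.List.pyGetD]
    rw [hv0]
    simp only [ge_iff_le, le_refl, if_pos]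
    have hpref : prefA (x :: rest) 0 = x :: prefA rest x := by simp [prefA]
    have := loop_eq (x :: rest) rest.length 1 x 0 (by omega) (by simp; omega)
    rw [hpref] at this
    simp only [Int.toNat_one, List.take_succ_cons, List.take_zero, List.sum_cons,
      List.sum_nil, add_zero] at this
    simp only [ge_iff_le, zero_add] at this ⊢
    rw [this]

-- ===== VERDICT (by name: the statement is the Claim_ definition above) =====
theorem stock_price_spec : Claim_equal_stock_price := by
  intro stockChart _ hpre
  unfold Spec_stock_price
  exact main_eq stockChart hpre
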